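-- pv_equiv track=rewrite | github.com/jeekim2/algostudy_ind | Problems/16401/ans_16401_JHK.py | find_max_cookie
-- ===== SOURCE A (Python) =====
-- def check_distr(ManNum, TarCookie, Cookies):
--     left = 0
--     right = len(Cookies)
--     while left < right:
--         mid = (left + right) // 2
--         if Cookies[mid] >= TarCookie:
--             right = mid
--         else:
--             left = mid + 1
--
--     Idx = right
--     ManCnt = 0
--     while Idx < len(Cookies):
--         # ManCnt += Cookies[Idx] // TarCookie
--         # 위 구문으로 아래 53~56번줄을 대체 가능하지만, 더 느림.
--         TempCookie = Cookies[Idx]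
--         while TempCookie >= TarCookie:
--             ManCnt += 1
--             TempCookie -= TarCookie
--             if ManCnt >= ManNum:
--                 return False
--         Idx += 1
--
--     # True when TarCookie is too long
--     return ManCnt < ManNum
--
-- def find_max_cookie(ManNum, Cookies):
--     # left = Cookies[0]
--     # 답이 될 수 있는 최솟값은 가장 작은 과자보다 더 작을 수 있다.
--     left = 1
--     right = Cookies[-1] + 1
--
--     while left < right:
--         mid = (left + right) // 2
--         if check_distr(ManNum, mid, Cookies):
--             right = mid
--         else:
--             left = mid + 1
--
--     return left - 1
-- ===== SOURCE B (Python) =====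
-- def _first_ge(Cookies, x):
--     lo, hi = 0, len(Cookies)
--     while lo < hi:
--         mid = (lo + hi) // 2
--         if Cookies[mid] < x:
--             lo = mid + 1
--         else:
--             hi = mid
--     return lo
--
-- def _can_serve(ManNum, size, Cookies):
--     # one integer division per cookie instead of repeated subtraction
--     cnt = 0
--     for idx in range(_first_ge(Cookies, size), len(Cookies)):
--         c = Cookies[idx]
--         if c >= size:
--             cnt += c // size
--             if cnt >= ManNum:
--                 return True
--     return cnt >= ManNum
--
-- def find_max_cookie(ManNum, Cookies):
--     lo = 1
--     hi = Cookies[-1] + 1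
--     while lo < hi:
--         mid = (lo + hi) // 2
--         if _can_serve(ManNum, mid, Cookies):
--             lo = mid + 1
--         else:
--             hi = mid
--     return lo - 1
-- ===== Notes on version B (the rewrite author's own statement) =====
-- stated objective: faster
-- what changed: B keeps the two binary searches but replaces A's per-cookie repeated-subtraction counting loop (up to ManNum subtractions per feasibility check) with a single integer division per cookie, keeping the same early exit once the count reaches ManNum.
import Mathlib
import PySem

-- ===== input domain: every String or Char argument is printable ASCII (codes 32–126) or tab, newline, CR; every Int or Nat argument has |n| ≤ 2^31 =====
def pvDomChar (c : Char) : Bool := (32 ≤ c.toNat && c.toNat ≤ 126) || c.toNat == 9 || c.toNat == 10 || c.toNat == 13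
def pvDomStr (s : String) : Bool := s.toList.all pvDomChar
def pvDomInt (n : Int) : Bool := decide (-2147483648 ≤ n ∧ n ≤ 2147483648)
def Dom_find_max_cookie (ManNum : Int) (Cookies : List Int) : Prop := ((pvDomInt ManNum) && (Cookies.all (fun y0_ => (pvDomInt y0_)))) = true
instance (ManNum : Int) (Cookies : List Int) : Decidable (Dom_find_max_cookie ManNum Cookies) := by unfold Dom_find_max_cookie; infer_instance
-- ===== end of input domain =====

-- B replaces A's per-cookie repeated-subtraction counting loop by one integer
-- division per cookie (with the same early exit), keeping the same index and
-- answer binary searches; equivalence of return values is proved on nonempty lists.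

-- ===== PORT A =====

-- list indexing; every call site below has the index in range (0 ≤ i < len)
def pvGetD (xs : List Int) (i : Int) : Int := (PySem.List.pyGet? xs i).getD 0

-- first while-loop of check_distr (binary search on indices); returns `right`
def cdBisect (Cookies : List Int) (TarCookie left right : Int) : Int :=
  if h : left < right then
    let mid := PySem.Int.floordiv (left + right) 2
    if TarCookie ≤ pvGetD Cookies mid then cdBisect Cookies TarCookie left mid
    else cdBisect Cookies TarCookie (mid + 1) right
  else right
termination_by (right - left).toNat
decreasing_by
  all_goals
    have h1 : left ≤ PySem.Int.floordiv (left + right) 2 :=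
      (PySem.Int.le_floordiv_iff_mul_le (by omega)).mpr (by omega)
    have h2 : PySem.Int.floordiv (left + right) 2 < right :=
      (PySem.Int.floordiv_lt_iff_lt_mul (by omega)).mpr (by omega)
    omega

-- innermost while-loop (`while TempCookie >= TarCookie`); `none` = `return False`.
-- Guard `TarCookie ≤ 0` is a totality guard only: find_max_cookie always calls
-- with TarCookie ≥ 1, so the guarded branch is unreachable from the entry point.
def cdInner (ManNum TarCookie ManCnt TempCookie : Int) : Option Int :=
  if _hT : TarCookie ≤ 0 then some ManCnt
  else if _h : TarCookie ≤ TempCookie then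
    if ManNum ≤ ManCnt + 1 then none
    else cdInner ManNum TarCookie (ManCnt + 1) (TempCookie - TarCookie)
  else some ManCnt
termination_by TempCookie.toNat
decreasing_by omega

-- second while-loop of check_distr, as recursion over the remaining suffix
def cdOuter (ManNum TarCookie : Int) (rest : List Int) (ManCnt : Int) : Bool :=
  match rest with
  | [] => decide (ManCnt < ManNum)
  | c :: rest' =>
    match cdInner ManNum TarCookie ManCnt c with
    | none => false
    | some cnt => cdOuter ManNum TarCookie rest' cnt

def check_distr (ManNum TarCookie : Int) (Cookies : List Int) : Bool :=
  cdOuter ManNum TarCookie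
    (Cookies.drop (cdBisect Cookies TarCookie 0 (Cookies.length : Int)).toNat) 0

-- the while-loop of find_max_cookie; returns the final `left`
def fmcLoop (ManNum : Int) (Cookies : List Int) (left right : Int) : Int :=
  if h : left < right then
    let mid := PySem.Int.floordiv (left + right) 2
    if check_distr ManNum mid Cookies then fmcLoop ManNum Cookies left mid
    else fmcLoop ManNum Cookies (mid + 1) right
  else left
termination_by (right - left).toNat
decreasing_by
  all_goals
    have h1 : left ≤ PySem.Int.floordiv (left + right) 2 :=
      (PySem.Int.le_floordiv_iff_mul_le (by omega)).mpr (by omega)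
    have h2 : PySem.Int.floordiv (left + right) 2 < right :=
      (PySem.Int.floordiv_lt_iff_lt_mul (by omega)).mpr (by omega)
    omega

-- Cookies[-1] raises IndexError on []; Pre_ excludes that input, the .getD 0 there is never used
def find_max_cookie (ManNum : Int) (Cookies : List Int) : Int :=
  fmcLoop ManNum Cookies 1 ((PySem.List.pyGet? Cookies (-1)).getD 0 + 1) - 1

-- ===== PORT B =====

-- _first_ge of Source B; returns the final `lo`
def bFirstGe (Cookies : List Int) (x lo hi : Int) : Int :=
  if h : lo < hi then
    let mid := PySem.Int.floordiv (lo + hi) 2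
    if pvGetD Cookies mid < x then bFirstGe Cookies x (mid + 1) hi
    else bFirstGe Cookies x lo mid
  else lo
termination_by (hi - lo).toNat
decreasing_by
  all_goals
    have h1 : lo ≤ PySem.Int.floordiv (lo + hi) 2 :=
      (PySem.Int.le_floordiv_iff_mul_le (by omega)).mpr (by omega)
    have h2 : PySem.Int.floordiv (lo + hi) 2 < hi :=
      (PySem.Int.floordiv_lt_iff_lt_mul (by omega)).mpr (by omega)
    omega

-- the for-loop of _can_serve, over the suffix Cookies[r:]; `true` = early `return True`
def bServeLoop (ManNum size : Int) : List Int → Int → Bool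
  | [], cnt => decide (ManNum ≤ cnt)
  | c :: rest, cnt =>
    if size ≤ c then
      let cnt' := cnt + PySem.Int.floordiv c size
      if ManNum ≤ cnt' then true
      else bServeLoop ManNum size rest cnt'
    else bServeLoop ManNum size rest cnt

def bCanServe (ManNum size : Int) (Cookies : List Int) : Bool :=
  bServeLoop ManNum size
    (Cookies.drop (bFirstGe Cookies size 0 (Cookies.length : Int)).toNat) 0

-- the while-loop of Source B's find_max_cookie; returns the final `lo`
def bLoop (ManNum : Int) (Cookies : List Int) (lo hi : Int) : Int :=
  if h : lo < hi then
    let mid := PySem.Int.floordiv (lo + hi) 2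
    if bCanServe ManNum mid Cookies then bLoop ManNum Cookies (mid + 1) hi
    else bLoop ManNum Cookies lo mid
  else lo
termination_by (hi - lo).toNat
decreasing_by
  all_goals
    have h1 : lo ≤ PySem.Int.floordiv (lo + hi) 2 :=
      (PySem.Int.le_floordiv_iff_mul_le (by omega)).mpr (by omega)
    have h2 : PySem.Int.floordiv (lo + hi) 2 < hi :=
      (PySem.Int.floordiv_lt_iff_lt_mul (by omega)).mpr (by omega)
    omega

def find_max_cookie_alt (ManNum : Int) (Cookies : List Int) : Int :=
  bLoop ManNum Cookies 1 ((PySem.List.pyGet? Cookies (-1)).getD 0 + 1) - 1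

-- ===== PRECONDITION & SPEC =====
-- Pre_ excludes only the empty list, on which Python's Cookies[-1] raises IndexError (in A and in B)
def Pre_find_max_cookie (ManNum : Int) (Cookies : List Int) : Prop := Cookies ≠ []
instance (ManNum : Int) (Cookies : List Int) : Decidable (Pre_find_max_cookie ManNum Cookies) := by
  unfold Pre_find_max_cookie; infer_instance
def pvWitness_find_max_cookie : Int × List Int := (2, [1, 2, 3])

def Spec_find_max_cookie (ManNum : Int) (Cookies : List Int) (out : Int) : Prop := out = find_max_cookie_alt ManNum Cookies
instance (ManNum : Int) (Cookies : List Int) (out : Int) : Decidable (Spec_find_max_cookie ManNum Cookies out) := by unfold Spec_find_max_cookie; infer_instance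

-- ===== CLAIM (what is proved, stated in full; the proofs are below) =====
def Claim_equal_find_max_cookie : Prop := ∀ (ManNum : Int) (Cookies : List Int), Dom_find_max_cookie ManNum Cookies → Pre_find_max_cookie ManNum Cookies → Spec_find_max_cookie ManNum Cookies (find_max_cookie ManNum Cookies)

-- ===== LEMMAS AND PROOFS =====

-- the per-cookie contribution and its suffix sum
def pvQ (T c : Int) : Int := if T ≤ c then PySem.Int.floordiv c T else 0

def pvS (T : Int) (l : List Int) : Int := (l.map (pvQ T)).sum

theorem pvQ_nonneg (T c : Int) (hT : 1 ≤ T) : 0 ≤ pvQ T c := by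
  unfold pvQ
  split_ifs with h
  · have := (PySem.Int.le_floordiv_iff_mul_le (a := c) (b := T) (q := 1) (by omega)).mpr (by omega)
    omega
  · omega

theorem pvS_nonneg (T : Int) (l : List Int) (hT : 1 ≤ T) : 0 ≤ pvS T l := by
  unfold pvS
  apply List.sum_nonneg
  intro x hx
  obtain ⟨c, _, rfl⟩ := List.mem_map.mp hx
  exact pvQ_nonneg T c hT

theorem pvS_cons (T c : Int) (l : List Int) : pvS T (c :: l) = pvQ T c + pvS T l := by
  simp [pvS]

-- the two index binary searches coincide (same iterates; at exit left = right)
theorem bisect_eq (C : List Int) (x : Int) :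
    ∀ (n : Nat) (l r : Int), (r - l).toNat ≤ n → l ≤ r →
      cdBisect C x l r = bFirstGe C x l r := by
  intro n
  induction n with
  | zero =>
    intro l r hn hlr
    have hlr' : l = r := by omega
    rw [cdBisect, bFirstGe]
    simp [hlr']
  | succ n ih =>
    intro l r hn hlr
    rw [cdBisect, bFirstGe]
    by_cases h : l < r
    · have h1 : l ≤ PySem.Int.floordiv (l + r) 2 :=
        (PySem.Int.le_floordiv_iff_mul_le (by omega)).mpr (by omega)
      have h2 : PySem.Int.floordiv (l + r) 2 < r :=
        (PySem.Int.floordiv_lt_iff_lt_mul (by omega)).mpr (by omega)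
      by_cases hc : x ≤ pvGetD C (PySem.Int.floordiv (l + r) 2)
      · simp only [dif_pos h, if_pos hc, if_neg (by omega : ¬ pvGetD C (PySem.Int.floordiv (l + r) 2) < x)]
        exact ih l (PySem.Int.floordiv (l + r) 2) (by omega) (by omega)
      · simp only [dif_pos h, if_neg hc, if_pos (by omega : pvGetD C (PySem.Int.floordiv (l + r) 2) < x)]
        exact ih (PySem.Int.floordiv (l + r) 2 + 1) r (by omega) (by omega)
    · have hlr' : l = r := by omega
      simp [hlr']

-- closed form of the inner subtraction loop: it counts TempCookie // TarCookie
theorem cdInner_eq (ManNum T : Int) (hT : 1 ≤ T) :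
    ∀ (n : Nat) (cnt c : Int), c.toNat ≤ n →
      cdInner ManNum T cnt c =
        if 1 ≤ pvQ T c ∧ ManNum ≤ cnt + pvQ T c then none else some (cnt + pvQ T c) := by
  intro n
  induction n with
  | zero =>
    intro cnt c hn
    have hc : ¬ T ≤ c := by omega
    have hQ : pvQ T c = 0 := by simp [pvQ, hc]
    rw [cdInner, dif_neg (show ¬ T ≤ 0 by omega), dif_neg hc, hQ,
      if_neg (show ¬ ((1:Int) ≤ 0 ∧ ManNum ≤ cnt + 0) by omega)]
    simp
  | succ n ih =>
    intro cnt c hn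
    rw [cdInner, dif_neg (show ¬ T ≤ 0 by omega)]
    by_cases hc : T ≤ c
    · -- one subtraction step; the quotient c // T is ≥ 1 and drops by exactly 1
      have hq1 : 1 ≤ PySem.Int.floordiv c T :=
        (PySem.Int.le_floordiv_iff_mul_le (a := c) (b := T) (q := 1) (by omega)).mpr (by omega)
      have hqc : PySem.Int.floordiv c T * T ≤ c ∧ c < (PySem.Int.floordiv c T + 1) * T :=
        (PySem.Int.floordiv_eq_iff_of_pos (a := c) (b := T) (by omega)).mp rfl
      have hqQ : pvQ T c = PySem.Int.floordiv c T := by simp [pvQ, hc]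
      rw [dif_pos hc]
      by_cases hstop : ManNum ≤ cnt + 1
      · rw [if_pos hstop,
          if_pos (show 1 ≤ pvQ T c ∧ ManNum ≤ cnt + pvQ T c from ⟨by omega, by omega⟩)]
      · rw [if_neg hstop, ih (cnt + 1) (c - T) (by omega)]
        have hQ2 : pvQ T (c - T) = PySem.Int.floordiv c T - 1 := by
          by_cases hc2 : T ≤ c - T
          · have hstep : PySem.Int.floordiv (c - T) T = PySem.Int.floordiv c T - 1 := by
              rw [PySem.Int.floordiv_eq_iff_of_pos (by omega)]
              constructor
              · nlinarith [hqc.1]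
              · nlinarith [hqc.2]
            simp [pvQ, hc2, hstep]
          · have hlt2 : PySem.Int.floordiv c T < 2 :=
              (PySem.Int.floordiv_lt_iff_lt_mul (a := c) (b := T) (q := 2) (by omega)).mpr (by omega)
            simp only [pvQ, if_neg hc2]
            omega
        rw [hQ2, hqQ]
        split_ifs with hA hB hB
        · rfl
        · exfalso; omega
        · exfalso; omega
        · congr 1
          omega
    · have hQ : pvQ T c = 0 := by simp [pvQ, hc]
      rw [dif_neg hc, hQ, if_neg (show ¬ ((1:Int) ≤ 0 ∧ ManNum ≤ cnt + 0) by omega)]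
      simp

-- the outer loop of check_distr returns (accumulated count + suffix count < ManNum)
theorem cdOuter_eq (ManNum T : Int) (hT : 1 ≤ T) :
    ∀ (rest : List Int) (cnt : Int),
      cdOuter ManNum T rest cnt = decide (cnt + pvS T rest < ManNum) := by
  intro rest
  induction rest with
  | nil => intro cnt; simp [cdOuter, pvS]
  | cons c rest ih =>
    intro cnt
    have hS : 0 ≤ pvS T rest := pvS_nonneg T rest hT
    rw [cdOuter, cdInner_eq ManNum T hT c.toNat cnt c le_rfl, pvS_cons]
    by_cases hstop : 1 ≤ pvQ T c ∧ ManNum ≤ cnt + pvQ T c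
    · rw [if_pos hstop]
      exact (decide_eq_false (by omega)).symm
    · rw [if_neg hstop]
      show cdOuter ManNum T rest (cnt + pvQ T c) = _
      rw [ih]
      simp only [decide_eq_decide]
      omega

-- B's division loop returns (accumulated count + suffix count ≥ ManNum)
theorem bServeLoop_eq (ManNum T : Int) (hT : 1 ≤ T) :
    ∀ (rest : List Int) (cnt : Int),
      bServeLoop ManNum T rest cnt = decide (ManNum ≤ cnt + pvS T rest) := by
  intro rest
  induction rest with
  | nil => intro cnt; simp [bServeLoop, pvS]
  | cons c rest ih =>
    intro cnt
    have hS : 0 ≤ pvS T rest := pvS_nonneg T rest hT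
    rw [bServeLoop, pvS_cons]
    by_cases hc : T ≤ c
    · have hqQ : pvQ T c = PySem.Int.floordiv c T := by simp [pvQ, hc]
      simp only [if_pos hc]
      by_cases hstop : ManNum ≤ cnt + PySem.Int.floordiv c T
      · rw [if_pos hstop]
        exact (decide_eq_true (by omega)).symm
      · rw [if_neg hstop, ih]
        simp only [decide_eq_decide]
        omega
    · have hQ : pvQ T c = 0 := by simp [pvQ, hc]
      simp only [if_neg hc, ih, hQ]
      simp only [decide_eq_decide]
      omega

theorem check_vs_serve (ManNum T : Int) (C : List Int) (hT : 1 ≤ T) :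
    check_distr ManNum T C = !bCanServe ManNum T C := by
  unfold check_distr bCanServe
  rw [← bisect_eq C T C.length 0 (C.length : Int) (by omega) (by omega)]
  rw [cdOuter_eq ManNum T hT, bServeLoop_eq ManNum T hT]
  by_cases h : ManNum ≤ 0 + pvS T (C.drop (cdBisect C T 0 (C.length : Int)).toNat)
  · rw [decide_eq_true h, decide_eq_false (by omega)]
    rfl
  · rw [decide_eq_false h, decide_eq_true (by omega)]
    rfl

theorem loops_eq (ManNum : Int) (C : List Int) :
    ∀ (n : Nat) (l r : Int), (r - l).toNat ≤ n → 1 ≤ l →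
      fmcLoop ManNum C l r = bLoop ManNum C l r := by
  intro n
  induction n with
  | zero =>
    intro l r hn hl
    have h : ¬ l < r := by omega
    rw [fmcLoop, bLoop]
    simp [h]
  | succ n ih =>
    intro l r hn hl
    rw [fmcLoop, bLoop]
    by_cases h : l < r
    · have h1 : l ≤ PySem.Int.floordiv (l + r) 2 :=
        (PySem.Int.le_floordiv_iff_mul_le (by omega)).mpr (by omega)
      have h2 : PySem.Int.floordiv (l + r) 2 < r :=
        (PySem.Int.floordiv_lt_iff_lt_mul (by omega)).mpr (by omega)
      have hchk := check_vs_serve ManNum (PySem.Int.floordiv (l + r) 2) C (by omega)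
      simp only [dif_pos h, hchk]
      by_cases hs : bCanServe ManNum (PySem.Int.floordiv (l + r) 2) C = true
      · simp only [hs, Bool.not_true, if_neg (by simp : ¬ (false = true))]
        exact ih (PySem.Int.floordiv (l + r) 2 + 1) r (by omega) (by omega)
      · simp only [Bool.not_eq_true] at hs
        simp only [hs, Bool.not_false]
        exact ih l (PySem.Int.floordiv (l + r) 2) (by omega) (by omega)
    · simp [h]

-- ===== VERDICT (by name: the statement is the Claim_ definition above) =====
theorem find_max_cookie_spec : Claim_equal_find_max_cookie := by
  intro ManNum Cookies _ _
  unfold Spec_find_max_cookie find_max_cookie find_max_cookie_alt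
  have := loops_eq ManNum Cookies ((PySem.List.pyGet? Cookies (-1)).getD 0 + 1 - 1).toNat 1
    ((PySem.List.pyGet? Cookies (-1)).getD 0 + 1) le_rfl (by omega)
  omega
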